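-- pv_equiv track=rewrite | github.com/WiktoriaWezgraj/Python | 10-Test2/mock/p10.py | f
-- ===== SOURCE A (Python) =====
-- def f(array):
--     smallest_value = array[0][0]
--     smallest_position = [0,0]
--     for row_index, row in enumerate(array):
--         for col_index, value in enumerate(row):
--             if value < smallest_value:
--                 smallest_value = value
--                 smallest_position = [row_index, col_index]
--
--     return smallest_position[0] == smallest_position[1]
-- ===== SOURCE B (Python) =====
-- def f(array):
--     smallest = min(v for row in array for v in row)
--     for i, row in enumerate(array):
--         for j, v in enumerate(row):
--             if v == smallest:
--                 return i == j
-- ===== Notes on version B (the rewrite author's own statement) =====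
-- stated objective: alternative
-- what changed: A tracks the minimum value together with its position in one pass; B first computes only the minimum of all elements and then a separate locate pass returns i == j at the first row-major element equal to it.
import Mathlib
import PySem

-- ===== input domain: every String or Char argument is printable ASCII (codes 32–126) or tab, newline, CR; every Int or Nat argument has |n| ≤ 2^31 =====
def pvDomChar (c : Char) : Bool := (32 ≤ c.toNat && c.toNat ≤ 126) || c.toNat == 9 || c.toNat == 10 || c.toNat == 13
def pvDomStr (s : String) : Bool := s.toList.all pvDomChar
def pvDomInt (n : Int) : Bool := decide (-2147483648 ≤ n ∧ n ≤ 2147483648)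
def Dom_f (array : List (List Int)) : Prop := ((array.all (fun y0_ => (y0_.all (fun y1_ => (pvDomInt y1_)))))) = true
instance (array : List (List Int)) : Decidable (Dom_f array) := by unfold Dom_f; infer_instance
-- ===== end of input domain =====

-- B separates "find the minimum" (one pass) from "locate its first occurrence" (second pass),
-- replacing A's single-pass value+position tracking; equivalence is over the return value (no mutation).

-- ===== PORT A =====
-- A: single pass, tracking (smallest_value, smallest_position); array[0][0] seed is headI.headI
-- (the out-of-range IndexError case is excluded by Pre_f below).
def f (array : List (List Int)) : Bool :=
  let st :=
    (PySem.List.enumerate array 0).foldl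
      (fun st p =>
        (PySem.List.enumerate p.2 0).foldl
          (fun st q => if q.2 < st.1 then (q.2, (p.1, q.1)) else st) st)
      (array.headI.headI, ((0 : Int), (0 : Int)))
  decide (st.2.1 = st.2.2)

-- ===== PORT B =====
-- B helper: the locate pass — return i == j at the first element equal to m
-- (Python's fall-off-the-end `return None` is unreachable when m is the minimum of a
-- nonempty flattening; the `none`/`[]` branches return false only for totality).
def fAltLocCols (m : Int) (i : Int) (j : Int) : List Int → Option Bool
  | [] => none
  | v :: rest => if v = m then some (decide (i = j)) else fAltLocCols m i (j + 1) rest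

def fAltLocRows (m : Int) (i : Int) : List (List Int) → Bool
  | [] => false
  | row :: rest =>
    match fAltLocCols m i 0 row with
    | some b => b
    | none => fAltLocRows m (i + 1) rest

def f_alt (array : List (List Int)) : Bool :=
  match PySem.List.min? (array.flatMap (fun row => row)) (fun v => v) with
  | none => false   -- Python B raises ValueError here (min of empty); excluded by Pre_f
  | some m => fAltLocRows m 0 array

-- ===== PRECONDITION & SPEC =====
-- Pre_f: exactly where Python A returns — array[0][0] must exist (A raises IndexError otherwise).
def Pre_f (array : List (List Int)) : Prop := array ≠ [] ∧ array.headI ≠ []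
instance (array : List (List Int)) : Decidable (Pre_f array) := by unfold Pre_f; infer_instance
def pvWitness_f : List (List Int) := [[3, 1], [0, 2]]

def Spec_f (array : List (List Int)) (out : Bool) : Prop := out = f_alt array
instance (array : List (List Int)) (out : Bool) : Decidable (Spec_f array out) := by unfold Spec_f; infer_instance

-- ===== CLAIM (what is proved, stated in full; the proofs are below) =====
def Claim_equal_f : Prop := ∀ (array : List (List Int)), Dom_f array → Pre_f array → Spec_f array (f array)

-- ===== LEMMAS AND PROOFS =====

-- The row-major list of (position, value) pairs, rows indexed from i.
def pvPairs (rows : List (List Int)) (i : Int) : List ((Int × Int) × Int) :=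
  (PySem.List.enumerate rows i).flatMap
    (fun p => (PySem.List.enumerate p.2 0).map (fun q => ((p.1, q.1), q.2)))

-- A's loop step over such pairs.
def pvStep (st : Int × (Int × Int)) (pr : (Int × Int) × Int) : Int × (Int × Int) :=
  if pr.2 < st.1 then (pr.2, pr.1) else st

theorem pvPairs_cons (row : List Int) (rest : List (List Int)) (i : Int) :
    pvPairs (row :: rest) i =
      (PySem.List.enumerate row 0).map (fun q => ((i, q.1), q.2)) ++ pvPairs rest (i + 1) := by
  simp [pvPairs, PySem.List.enumerate_cons]

theorem pvPairs_map_snd (rows : List (List Int)) (i : Int) :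
    (pvPairs rows i).map Prod.snd = rows.flatMap (fun row => row) := by
  induction rows generalizing i with
  | nil => rfl
  | cons row rest ih =>
      rw [pvPairs_cons, List.map_append, List.map_map, ih]
      congr 1
      simp [Function.comp_def, PySem.List.map_snd_enumerate]

theorem pvFoldlMin_le (l : List Int) (a : Int) : l.foldl min a ≤ a := by
  induction l generalizing a with
  | nil => simp
  | cons x t ih => exact le_trans (ih (min a x)) (min_le_left a x)

theorem pvFoldlMin_mem (l : List Int) (a : Int) : l.foldl min a ∈ a :: l := by
  induction l generalizing a with
  | nil => simp
  | cons x t ih =>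
      rw [List.foldl_cons]
      rcases List.mem_cons.mp (ih (min a x)) with h | h
      · rw [h]; rcases min_choice a x with hm | hm <;> simp [hm]
      · simp [h]

-- Characterisation of A's fold: final value is the running minimum, final position is the
-- first pair (seed included as head) whose value equals that minimum.
theorem pvFold_char (pairs : List ((Int × Int) × Int)) (v0 : Int) (p0 d : Int × Int) :
    pairs.foldl pvStep (v0, p0) =
      ((pairs.map Prod.snd).foldl min v0,
       (((((p0, v0) :: pairs).find? (fun pr => pr.2 == (pairs.map Prod.snd).foldl min v0)).map
          Prod.fst).getD d)) := by
  induction pairs generalizing v0 p0 with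
  | nil => simp [List.find?]
  | cons pr rest ih =>
      obtain ⟨p, v⟩ := pr
      by_cases hv : v < v0
      · have hmin : min v0 v = v := min_eq_right (le_of_lt hv)
        have hM : ((v :: rest.map Prod.snd).foldl min v0) = (rest.map Prod.snd).foldl min v := by
          simp [List.foldl_cons, hmin]
        have hMlt : (rest.map Prod.snd).foldl min v < v0 :=
          lt_of_le_of_lt (pvFoldlMin_le _ _) hv
        rw [List.foldl_cons]
        have hstep : pvStep (v0, p0) (p, v) = (v, p) := by simp [pvStep, hv]
        rw [hstep, ih v p]
        simp only [List.map_cons, hM]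
        have h1 : ¬(((p0, v0) : (Int × Int) × Int).2 ==
            List.foldl min v (List.map Prod.snd rest)) = true := by
          simpa using ne_of_gt hMlt
        conv_rhs =>
          rw [List.find?_cons_of_neg
            (p := fun (pr : (Int × Int) × Int) => pr.2 == List.foldl min v (List.map Prod.snd rest)) h1]
      · have hv0 : v0 ≤ v := le_of_not_gt hv
        have hmin : min v0 v = v0 := min_eq_left hv0
        have hM : ((v :: rest.map Prod.snd).foldl min v0) = (rest.map Prod.snd).foldl min v0 := by
          simp [List.foldl_cons, hmin]
        rw [List.foldl_cons]
        have hstep : pvStep (v0, p0) (p, v) = (v0, p0) := by simp [pvStep, hv]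
        rw [hstep, ih v0 p0]
        simp only [List.map_cons, hM]
        by_cases h0 : v0 = (rest.map Prod.snd).foldl min v0
        · have h1 : (((p0, v0) : (Int × Int) × Int).2 ==
              List.foldl min v0 (List.map Prod.snd rest)) = true := by simp [← h0]
          conv_lhs =>
            rw [List.find?_cons_of_pos
              (p := fun (pr : (Int × Int) × Int) => pr.2 == List.foldl min v0 (List.map Prod.snd rest)) h1]
          conv_rhs =>
            rw [List.find?_cons_of_pos
              (p := fun (pr : (Int × Int) × Int) => pr.2 == List.foldl min v0 (List.map Prod.snd rest)) h1]
        · have hMle : (rest.map Prod.snd).foldl min v0 ≤ v0 := pvFoldlMin_le _ _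
          have hMltv : (rest.map Prod.snd).foldl min v0 < v :=
            lt_of_lt_of_le (lt_of_le_of_ne hMle (fun h => h0 h.symm)) hv0
          have h1 : ¬(((p0, v0) : (Int × Int) × Int).2 ==
              List.foldl min v0 (List.map Prod.snd rest)) = true := by simpa using h0
          have h2 : ¬(((p, v) : (Int × Int) × Int).2 ==
              List.foldl min v0 (List.map Prod.snd rest)) = true := by
            simpa using ne_of_gt hMltv
          conv_lhs =>
            rw [List.find?_cons_of_neg
              (p := fun (pr : (Int × Int) × Int) => pr.2 == List.foldl min v0 (List.map Prod.snd rest)) h1]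
          conv_rhs =>
            rw [List.find?_cons_of_neg
              (p := fun (pr : (Int × Int) × Int) => pr.2 == List.foldl min v0 (List.map Prod.snd rest)) h1,
              List.find?_cons_of_neg
              (p := fun (pr : (Int × Int) × Int) => pr.2 == List.foldl min v0 (List.map Prod.snd rest)) h2]

-- A's nested fold over enumerates is the flat fold over pvPairs.
theorem pvNested_eq_flat (rows : List (List Int)) (i : Int) (st : Int × (Int × Int)) :
    (PySem.List.enumerate rows i).foldl
        (fun st p =>
          (PySem.List.enumerate p.2 0).foldl
            (fun st q => if q.2 < st.1 then (q.2, (p.1, q.1)) else st) st) st =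
      (pvPairs rows i).foldl pvStep st := by
  induction rows generalizing i st with
  | nil => rfl
  | cons row rest ih =>
      rw [PySem.List.enumerate_cons, List.foldl_cons, pvPairs_cons, List.foldl_append,
        List.foldl_map, ih]
      rfl

-- B's locate pass returns "first matching pair, compare its indices" over pvPairs.
theorem pvLocCols_char (m : Int) (iIdx : Int) (row : List Int) (j : Int) :
    fAltLocCols m iIdx j row =
      (((PySem.List.enumerate row j).map (fun q => ((iIdx, q.1), q.2))).find?
          (fun pr => pr.2 == m)).map (fun pr => decide (pr.1.1 = pr.1.2)) := by
  induction row generalizing j with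
  | nil => rfl
  | cons v rest ih =>
      rw [PySem.List.enumerate_cons]
      by_cases hv : v = m
      · simp [fAltLocCols, hv, List.find?_cons_of_pos]
      · rw [List.map_cons, List.find?_cons_of_neg (by simpa using hv)]
        simpa [fAltLocCols, hv] using ih (j + 1)

theorem pvLocRows_char (m : Int) (rows : List (List Int)) (i : Int) :
    fAltLocRows m i rows =
      (((pvPairs rows i).find? (fun pr => pr.2 == m)).map
        (fun pr => decide (pr.1.1 = pr.1.2))).getD false := by
  induction rows generalizing i with
  | nil => rfl
  | cons row rest ih =>
      rw [pvPairs_cons, List.find?_append]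
      rw [show fAltLocRows m i (row :: rest) =
        (match fAltLocCols m i 0 row with
         | some b => b
         | none => fAltLocRows m (i + 1) rest) from rfl]
      rw [pvLocCols_char m i row 0]
      cases hfind : ((PySem.List.enumerate row 0).map (fun q => ((i, q.1), q.2))).find?
          (fun pr => pr.2 == m) with
      | none => simp [ih]
      | some pr => simp

-- ===== VERDICT (by name: the statement is the Claim_ definition above) =====
theorem f_spec : Claim_equal_f := by
  intro array _ hpre
  obtain ⟨hne, hhead⟩ := hpre
  match array, hne, hhead with
  | (a :: r0) :: rest, hne, hhead => ?_
  show Spec_f _ _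
  unfold Spec_f f f_alt
  have hflat : ((a :: r0) :: rest).flatMap (fun row => row) =
      a :: (r0 ++ rest.flatMap (fun row => row)) := by simp
  simp only [pvNested_eq_flat, List.headI, hflat, PySem.List.min?_id_cons]
  rw [pvFold_char _ _ _ ((0 : Int), (0 : Int))]
  set M := ((pvPairs ((a :: r0) :: rest) 0).map Prod.snd).foldl min a with hMdef
  have hMvals : (pvPairs ((a :: r0) :: rest) 0).map Prod.snd =
      a :: (r0 ++ rest.flatMap (fun row => row)) := by
    rw [pvPairs_map_snd]; exact hflat
  have hMeq : (r0 ++ rest.flatMap (fun row => row)).foldl min a = M := by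
    rw [hMdef, hMvals, List.foldl_cons, min_self]
  rw [hMeq, pvLocRows_char]
  -- the seed pair duplicates the head of pvPairs, so find? over seed::pairs = find? over pairs
  have hp : pvPairs ((a :: r0) :: rest) 0 =
      ((0, 0), a) :: ((PySem.List.enumerate r0 1).map (fun q => (((0 : Int), q.1), q.2)) ++
        pvPairs rest 1) := by
    simp [pvPairs_cons, PySem.List.enumerate_cons]
  have hdup : ((((0 : Int), (0 : Int)), a) :: pvPairs ((a :: r0) :: rest) 0).find?
      (fun pr => pr.2 == M) = (pvPairs ((a :: r0) :: rest) 0).find? (fun pr => pr.2 == M) := by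
    rw [hp]
    by_cases ha : a = M
    · rw [List.find?_cons_of_pos (by simp [ha]), List.find?_cons_of_pos (by simp [ha])]
    · rw [List.find?_cons_of_neg (by simpa using ha)]
  rw [hdup]
  -- M occurs among the pair values, so find? succeeds
  have hMmem : M ∈ (pvPairs ((a :: r0) :: rest) 0).map Prod.snd := by
    rcases List.mem_cons.mp
        (pvFoldlMin_mem ((r0 ++ rest.flatMap (fun row => row))) a) with h | h
    · rw [hMvals, ← hMeq, h]; simp
    · rw [hMvals]; exact List.mem_cons_of_mem _ (by rw [← hMeq]; exact h)
  obtain ⟨pr, hprmem, hprval⟩ := List.mem_map.mp hMmem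
  have hsome : ((pvPairs ((a :: r0) :: rest) 0).find? (fun pr => pr.2 == M)).isSome := by
    rw [List.find?_isSome]
    exact ⟨pr, hprmem, by simp [hprval]⟩
  cases hfind : (pvPairs ((a :: r0) :: rest) 0).find? (fun pr => pr.2 == M) with
  | none => rw [hfind] at hsome; simp at hsome
  | some w => simp
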